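-- pv_equiv track=rewrite | github.com/grahama1970/llm_call | scripts/fixes/fix_bare_excepts.py | is_final_catchall
-- ===== SOURCE A (Python) =====
-- from typing import List, Tuple, Dict, Optional
--
-- def is_final_catchall(lines: List[str], current_index: int) -> bool:
--     """Check if this Exception handler is the final catch-all in a try block."""
--     # Look backwards for other except clauses
--     i = current_index - 1
--     found_specific_except = False
--
--     while i >= 0:
--         line = lines[i].strip()
--         if line.startswith('try:'):
--             break
--         if line.startswith('except') and not line.startswith('except Exception'):
--             found_specific_except = True
--         i -= 1
--
--     return found_specific_except
-- ===== SOURCE B (Python) =====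
-- def is_final_catchall(lines, current_index):
--     """Check if this Exception handler is the final catch-all in a try block.
--
--     Forward single pass: state resets at each 'try:' instead of scanning
--     backward and breaking at the nearest 'try:'.
--     """
--     found_specific = False
--     for i in range(current_index):
--         s = lines[i].strip()
--         if s.startswith('try:'):
--             found_specific = False
--         elif s.startswith('except') and not s.startswith('except Exception'):
--             found_specific = True
--     return found_specific
-- ===== Notes on version B (the rewrite author's own statement) =====
-- stated objective: alternative
-- what changed: Replaced the backward scan that breaks at the nearest enclosing 'try:' with a forward single pass over the prefix whose boolean state is reset to False at every 'try:' line, so no early exit or reverse traversal is needed.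
import Mathlib
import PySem

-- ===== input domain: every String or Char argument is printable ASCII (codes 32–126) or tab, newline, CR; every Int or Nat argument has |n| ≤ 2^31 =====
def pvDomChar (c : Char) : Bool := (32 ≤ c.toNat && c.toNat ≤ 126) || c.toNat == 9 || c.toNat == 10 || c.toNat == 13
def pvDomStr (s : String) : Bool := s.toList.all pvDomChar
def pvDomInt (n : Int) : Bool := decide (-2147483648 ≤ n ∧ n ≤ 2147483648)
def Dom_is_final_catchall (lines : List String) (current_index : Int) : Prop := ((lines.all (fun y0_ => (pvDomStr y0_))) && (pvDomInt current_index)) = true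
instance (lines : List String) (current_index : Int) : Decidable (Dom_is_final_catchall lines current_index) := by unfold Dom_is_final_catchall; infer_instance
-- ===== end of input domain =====

-- B changes the traversal: a forward single pass whose state resets at each 'try:',
-- instead of A's backward scan that breaks at the nearest 'try:'; same cost, different strategy.

-- ===== PORT A =====
-- backward while-loop of A; fuel n means the current index is n-1 (n = 0 ⇔ i < 0, loop ends)
def aLoop (lines : List String) : Nat → Bool → Bool
  | 0, found => found
  | n+1, found =>
    let line := PySem.Str.strip (PySem.List.pyGetD lines (n : Int) "")
    if PySem.Str.startswith line "try:" then found
    else aLoop lines n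
      (if PySem.Str.startswith line "except" && !(PySem.Str.startswith line "except Exception")
       then true else found)

def is_final_catchall (lines : List String) (current_index : Int) : Bool :=
  aLoop lines current_index.toNat false

-- ===== PORT B =====
-- loop body of B's forward pass
def bStep (lines : List String) (found : Bool) (i : Int) : Bool :=
  let s := PySem.Str.strip (PySem.List.pyGetD lines i "")
  if PySem.Str.startswith s "try:" then false
  else if PySem.Str.startswith s "except" && !(PySem.Str.startswith s "except Exception")
       then true else found

def is_final_catchall_alt (lines : List String) (current_index : Int) : Bool :=
  (PySem.List.pyRange 0 current_index 1).foldl (bStep lines) false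

-- ===== PRECONDITION & SPEC =====
-- Pre_ excludes exactly the inputs where the Python A raises IndexError (current_index > len(lines))
def Pre_is_final_catchall (lines : List String) (current_index : Int) : Prop :=
  current_index ≤ (lines.length : Int)
instance (lines : List String) (current_index : Int) : Decidable (Pre_is_final_catchall lines current_index) := by unfold Pre_is_final_catchall; infer_instance

def pvWitness_is_final_catchall : List String × Int :=
  (["try:", "    x = 1", "except ValueError:", "    pass", "except Exception:"], 4)

def Spec_is_final_catchall (lines : List String) (current_index : Int) (out : Bool) : Prop := out = is_final_catchall_alt lines current_index
instance (lines : List String) (current_index : Int) (out : Bool) : Decidable (Spec_is_final_catchall lines current_index out) := by unfold Spec_is_final_catchall; infer_instance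

-- ===== CLAIM (what is proved, stated in full; the proofs are below) =====
def Claim_equal_is_final_catchall : Prop := ∀ (lines : List String) (current_index : Int), Dom_is_final_catchall lines current_index → Pre_is_final_catchall lines current_index → Spec_is_final_catchall lines current_index (is_final_catchall lines current_index)

-- ===== LEMMAS AND PROOFS =====
-- A's backward accumulation relates to B's forward fold: the accumulator passes through as an 'or'.
lemma aLoop_eq_foldl (lines : List String) :
    ∀ (n : Nat) (found : Bool),
      aLoop lines n found
        = (found || (PySem.List.pyRange 0 (n : Int) 1).foldl (bStep lines) false) := by
  intro n
  induction n with
  | zero =>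
      intro found
      simp [aLoop, PySem.List.pyRange_one_eq_nil]
  | succ n ih =>
      intro found
      have hsplit : PySem.List.pyRange 0 ((n : Int) + 1) 1
          = PySem.List.pyRange 0 (n : Int) 1 ++ [(n : Int)] :=
        PySem.List.pyRange_one_succ_right (by exact_mod_cast Nat.zero_le n)
      have hcast : ((n + 1 : Nat) : Int) = (n : Int) + 1 := by push_cast; ring
      have ha : aLoop lines (n+1) found =
          (if PySem.Str.startswith (PySem.Str.strip (PySem.List.pyGetD lines (n : Int) "")) "try:" then found
           else aLoop lines n
             (if PySem.Str.startswith (PySem.Str.strip (PySem.List.pyGetD lines (n : Int) "")) "except"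
                  && !(PySem.Str.startswith (PySem.Str.strip (PySem.List.pyGetD lines (n : Int) "")) "except Exception")
              then true else found)) := rfl
      have hb : ∀ acc : Bool, bStep lines acc (n : Int) =
          (if PySem.Str.startswith (PySem.Str.strip (PySem.List.pyGetD lines (n : Int) "")) "try:" then false
           else if PySem.Str.startswith (PySem.Str.strip (PySem.List.pyGetD lines (n : Int) "")) "except"
                  && !(PySem.Str.startswith (PySem.Str.strip (PySem.List.pyGetD lines (n : Int) "")) "except Exception")
              then true else acc) := fun _ => rfl
      rw [hcast, hsplit, List.foldl_append, List.foldl_cons, List.foldl_nil, hb, ha, ih]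
      generalize (PySem.List.pyRange 0 (n : Int) 1).foldl (bStep lines) false = F
      cases hT : PySem.Str.startswith (PySem.Str.strip (PySem.List.pyGetD lines (n : Int) "")) "try:" <;>
        cases hE : PySem.Str.startswith (PySem.Str.strip (PySem.List.pyGetD lines (n : Int) "")) "except"
                  && !(PySem.Str.startswith (PySem.Str.strip (PySem.List.pyGetD lines (n : Int) "")) "except Exception") <;>
        cases found <;> cases F <;> rfl

-- ===== VERDICT (by name: the statement is the Claim_ definition above) =====
theorem is_final_catchall_spec : Claim_equal_is_final_catchall := by
  intro lines ci _ _
  unfold Spec_is_final_catchall is_final_catchall is_final_catchall_alt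
  rw [aLoop_eq_foldl]
  by_cases h : 0 ≤ ci
  · rw [Int.toNat_of_nonneg h]; simp
  · have h1 : ci.toNat = 0 := Int.toNat_of_nonpos (le_of_lt (not_le.mp h))
    have h2 : PySem.List.pyRange 0 ci 1 = [] :=
      PySem.List.pyRange_one_eq_nil (le_of_lt (not_le.mp h))
    rw [h1, h2]
    simp [PySem.List.pyRange_one_eq_nil]
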